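-- pv_equiv track=rewrite | github.com/RatnakarVise/REMEDIATOR_AGE_V3 | app/main.py | smart_chunk_code
-- ===== SOURCE A (Python) =====
-- def smart_chunk_code(lines, max_lines=600):
--     chunks = []
--     current_chunk = []
--     for line in lines:
--         current_chunk.append(line)
--         if len(current_chunk) >= max_lines or line.strip().upper().startswith("FORM") or line.strip().upper().startswith("END"):
--             chunks.append(current_chunk)
--             current_chunk = []
--     if current_chunk:
--         chunks.append(current_chunk)
--     return chunks
-- ===== SOURCE B (Python) =====
-- def smart_chunk_code(lines, max_lines=600):
--     step = max(max_lines, 1)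
--     segments = []
--     seg = []
--     for line in lines:
--         seg.append(line)
--         s = line.strip().upper()
--         if s.startswith("FORM") or s.startswith("END"):
--             segments.append(seg)
--             seg = []
--     if seg:
--         segments.append(seg)
--     chunks = []
--     for seg in segments:
--         while seg:
--             chunks.append(seg[:step])
--             seg = seg[step:]
--     return chunks
-- ===== Notes on version B (the rewrite author's own statement) =====
-- stated objective: alternative
-- what changed: B replaces A's single loop with a running size counter by two phases: first split the lines into keyword-terminated segments, then slice each segment into fixed-size blocks of max(max_lines,1) lines.
import Mathlib
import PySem

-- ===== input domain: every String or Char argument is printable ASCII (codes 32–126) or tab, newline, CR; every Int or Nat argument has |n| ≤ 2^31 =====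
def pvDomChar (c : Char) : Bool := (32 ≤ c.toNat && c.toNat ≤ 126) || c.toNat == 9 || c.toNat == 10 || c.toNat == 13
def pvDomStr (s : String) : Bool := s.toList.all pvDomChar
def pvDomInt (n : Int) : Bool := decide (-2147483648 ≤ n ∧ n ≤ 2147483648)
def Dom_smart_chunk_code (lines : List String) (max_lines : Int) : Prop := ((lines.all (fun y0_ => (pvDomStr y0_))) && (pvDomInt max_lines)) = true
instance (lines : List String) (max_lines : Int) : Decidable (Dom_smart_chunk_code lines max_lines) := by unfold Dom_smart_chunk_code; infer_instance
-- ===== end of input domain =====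

-- B uses a different decomposition (split into keyword-terminated segments, then cut each into fixed-size blocks); same return value on all inputs.

-- ===== PORT A =====
def smart_chunk_code (lines : List String) (max_lines : Int) : List (List String) :=
  let st := lines.foldl (fun (st : List (List String) × List String) line =>
      let cur := st.2 ++ [line]
      if (cur.length : Int) ≥ max_lines
          ∨ PySem.Str.startswith (PySem.Str.upper (PySem.Str.strip line)) "FORM" = true
          ∨ PySem.Str.startswith (PySem.Str.upper (PySem.Str.strip line)) "END" = true
      then (st.1 ++ [cur], [])
      else (st.1, cur)) ([], [])
  if st.2 = [] then st.1 else st.1 ++ [st.2]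

-- ===== PORT B =====
def pvKw (line : String) : Bool :=
  let s := PySem.Str.upper (PySem.Str.strip line)
  PySem.Str.startswith s "FORM" || PySem.Str.startswith s "END"

-- inner while loop of Source B; the 'step ≤ 0' guard only totalizes (B always calls with step = max(max_lines,1) ≥ 1)
def pvBlocks (step : Int) (seg : List String) : List (List String) :=
  if seg = [] ∨ step ≤ 0 then []
  else
    PySem.List.slice seg none (some step) ::
      pvBlocks step (PySem.List.slice seg (some step) none)
termination_by seg.length
decreasing_by
  rename_i h
  rw [not_or, not_le] at h
  rw [PySem.List.slice_from _ (by omega : (0:Int) ≤ step)]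
  have h2 : seg.length ≠ 0 := fun hn => h.1 (List.eq_nil_of_length_eq_zero hn)
  have h1 : 1 ≤ step.toNat := by omega
  simp only [List.length_drop]; omega

def smart_chunk_code_alt (lines : List String) (max_lines : Int) : List (List String) :=
  let step := max max_lines 1
  let st := lines.foldl (fun (st : List (List String) × List String) line =>
      let seg := st.2 ++ [line]
      if pvKw line then (st.1 ++ [seg], []) else (st.1, seg)) ([], [])
  let segments := if st.2 = [] then st.1 else st.1 ++ [st.2]
  segments.flatMap (pvBlocks step)

-- ===== PRECONDITION & SPEC =====
def Spec_smart_chunk_code (lines : List String) (max_lines : Int) (out : List (List String)) : Prop := out = smart_chunk_code_alt lines max_lines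
instance (lines : List String) (max_lines : Int) (out : List (List String)) : Decidable (Spec_smart_chunk_code lines max_lines out) := by unfold Spec_smart_chunk_code; infer_instance

-- ===== CLAIM (what is proved, stated in full; the proofs are below) =====
def Claim_equal_smart_chunk_code : Prop := ∀ (lines : List String) (max_lines : Int), Dom_smart_chunk_code lines max_lines → Spec_smart_chunk_code lines max_lines (smart_chunk_code lines max_lines)

-- ===== LEMMAS AND PROOFS =====

-- common reference: process lines with current chunk `cur`, cutting at size `max ml 1` or at keyword lines
def gSpec (ml : Int) : List String → List String → List (List String)
  | cur, [] => if cur = [] then [] else [cur]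
  | cur, l :: ls =>
      let cur' := cur ++ [l]
      if ((cur'.length : Int) = max ml 1 ∨ pvKw l = true) then cur' :: gSpec ml [] ls else gSpec ml cur' ls

def stepA (ml : Int) (st : List (List String) × List String) (line : String) :
    List (List String) × List String :=
  let cur := st.2 ++ [line]
  if (cur.length : Int) ≥ ml
      ∨ PySem.Str.startswith (PySem.Str.upper (PySem.Str.strip line)) "FORM" = true
      ∨ PySem.Str.startswith (PySem.Str.upper (PySem.Str.strip line)) "END" = true
  then (st.1 ++ [cur], [])
  else (st.1, cur)

def stepB (st : List (List String) × List String) (line : String) :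
    List (List String) × List String :=
  let seg := st.2 ++ [line]
  if pvKw line then (st.1 ++ [seg], []) else (st.1, seg)

lemma pvBlocks_nil (step : Int) : pvBlocks step [] = [] := by
  rw [pvBlocks]; simp

lemma pvBlocks_cons (step : Int) (seg : List String) (hs : 1 ≤ step) (hseg : seg ≠ []) :
    pvBlocks step seg = seg.take step.toNat :: pvBlocks step (seg.drop step.toNat) := by
  rw [pvBlocks]
  rw [if_neg (by rw [not_or, not_le]; exact ⟨hseg, by omega⟩)]
  rw [PySem.List.slice_to _ (by omega : (0:Int) ≤ step),
      PySem.List.slice_from _ (by omega : (0:Int) ≤ step)]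

lemma pvBlocks_small (step : Int) (seg : List String) (hs : 1 ≤ step)
    (h0 : seg ≠ []) (hle : seg.length ≤ step.toNat) :
    pvBlocks step seg = [seg] := by
  rw [pvBlocks_cons step seg hs h0, List.take_of_length_le hle,
      List.drop_eq_nil_of_le hle, pvBlocks_nil]

lemma pvBlocks_append_aux (step : Int) (hs : 1 ≤ step) :
    ∀ (n : ℕ) (p r : List String), p.length ≤ n → p.length % step.toNat = 0 →
      pvBlocks step (p ++ r) = pvBlocks step p ++ pvBlocks step r := by
  intro n
  induction n with
  | zero =>
    intro p r hn _
    have : p = [] := List.eq_nil_of_length_eq_zero (by omega)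
    simp [this, pvBlocks_nil]
  | succ n ih =>
    intro p r hn hmod
    by_cases hp : p = []
    · simp [hp, pvBlocks_nil]
    · have hlen0 : p.length ≠ 0 := fun h => hp (List.eq_nil_of_length_eq_zero h)
      have hs1 : 1 ≤ step.toNat := by omega
      have hsp : step.toNat ≤ p.length := by
        by_contra hlt
        rw [Nat.mod_eq_of_lt (by omega)] at hmod
        exact hlen0 hmod
      have hpr : p ++ r ≠ [] := by simp [hp]
      rw [pvBlocks_cons step (p ++ r) hs hpr, pvBlocks_cons step p hs hp,
          List.take_append_of_le_length hsp, List.drop_append_of_le_length hsp]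
      have hmod2 : (p.length - step.toNat) % step.toNat = 0 := by
        obtain ⟨k, hk⟩ := Nat.dvd_of_mod_eq_zero hmod
        rw [hk]
        rcases k with _ | k
        · simp
        · have hk2 : step.toNat * (k + 1) - step.toNat = step.toNat * k := by ring_nf; omega
          simp [hk2, Nat.mul_mod_right]
      rw [ih (p.drop step.toNat) r (by simp only [List.length_drop]; omega)
            (by simp only [List.length_drop]; exact hmod2)]
      simp

lemma pvBlocks_append (step : Int) (hs : 1 ≤ step) (p r : List String)
    (hmod : p.length % step.toNat = 0) :
    pvBlocks step (p ++ r) = pvBlocks step p ++ pvBlocks step r :=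
  pvBlocks_append_aux step hs p.length p r le_rfl hmod

-- A's fold, flushed, equals gSpec
lemma foldA_eq (ml : Int) :
    ∀ (ls : List String) (chunks : List (List String)) (cur : List String),
      (cur.length : Int) < max ml 1 →
      (if (ls.foldl (stepA ml) (chunks, cur)).2 = []
       then (ls.foldl (stepA ml) (chunks, cur)).1
       else (ls.foldl (stepA ml) (chunks, cur)).1 ++ [(ls.foldl (stepA ml) (chunks, cur)).2])
        = chunks ++ gSpec ml cur ls := by
  intro ls
  have hs0 : (1:Int) ≤ max ml 1 := le_max_right ml 1
  have hmx : (max ml 1 = ml ∧ 1 ≤ ml) ∨ (max ml 1 = 1 ∧ ml ≤ 1) := by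
    rcases le_total ml 1 with h | h
    · exact Or.inr ⟨max_eq_right h, h⟩
    · exact Or.inl ⟨max_eq_left h, h⟩
  induction ls with
  | nil =>
    intro chunks cur _
    by_cases h : cur = [] <;> simp [gSpec, h]
  | cons l ls ih =>
    intro chunks cur hcur
    have hlen : ((cur ++ [l]).length : Int) = (cur.length : Int) + 1 := by
      simp only [List.length_append, List.length_cons, List.length_nil]; push_cast; ring
    simp only [List.foldl_cons, stepA]
    by_cases hA : ((cur ++ [l]).length : Int) ≥ ml
        ∨ PySem.Str.startswith (PySem.Str.upper (PySem.Str.strip l)) "FORM" = true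
        ∨ PySem.Str.startswith (PySem.Str.upper (PySem.Str.strip l)) "END" = true
    · have hg : ((cur ++ [l]).length : Int) = max ml 1 ∨ pvKw l = true := by
        rcases hA with hsz | hF | hE
        · exact Or.inl (by rcases hmx with ⟨h1, h2⟩ | ⟨h1, h2⟩ <;> omega)
        · exact Or.inr (by simp only [pvKw, Bool.or_eq_true]; exact Or.inl hF)
        · exact Or.inr (by simp only [pvKw, Bool.or_eq_true]; exact Or.inr hE)
      rw [if_pos hA, ih (chunks ++ [cur ++ [l]]) [] (by simp only [List.length_nil, Nat.cast_zero]; omega)]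
      simp only [gSpec]
      rw [if_pos hg]
      simp
    · have hg : ¬ (((cur ++ [l]).length : Int) = max ml 1 ∨ pvKw l = true) := by
        rw [not_or] at hA ⊢
        refine ⟨by omega, ?_⟩
        rw [not_or] at hA
        simp only [pvKw, Bool.or_eq_true, not_or]
        exact ⟨hA.2.1, hA.2.2⟩
      rw [if_neg hA, ih chunks (cur ++ [l]) (by omega)]
      simp only [gSpec]
      rw [if_neg hg]

-- B's segment fold, as a recursion
def segRun : List String → List String → List (List String)
  | seg, [] => if seg = [] then [] else [seg]
  | seg, l :: ls => if pvKw l then (seg ++ [l]) :: segRun [] ls else segRun (seg ++ [l]) ls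

lemma foldB_eq :
    ∀ (ls : List String) (segs : List (List String)) (seg : List String),
      (if (ls.foldl stepB (segs, seg)).2 = []
       then (ls.foldl stepB (segs, seg)).1
       else (ls.foldl stepB (segs, seg)).1 ++ [(ls.foldl stepB (segs, seg)).2])
        = segs ++ segRun seg ls := by
  intro ls
  induction ls with
  | nil =>
    intro segs seg
    by_cases h : seg = [] <;> simp [segRun, h]
  | cons l ls ih =>
    intro segs seg
    simp only [List.foldl_cons, stepB, segRun]
    by_cases hk : pvKw l = true
    · rw [if_pos hk, if_pos hk, ih]
      simp
    · rw [if_neg hk, if_neg hk, ih]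

lemma segRun_blocks (ml : Int) :
    ∀ (ls : List String) (p cur : List String),
      p.length % (max ml 1).toNat = 0 → cur.length < (max ml 1).toNat →
      (segRun (p ++ cur) ls).flatMap (pvBlocks (max ml 1)) =
        pvBlocks (max ml 1) p ++ gSpec ml cur ls := by
  intro ls
  have hs : (1:Int) ≤ max ml 1 := le_max_right ml 1
  have hs1 : 1 ≤ (max ml 1).toNat := by omega
  induction ls with
  | nil =>
    intro p cur hmod hcur
    by_cases hc : cur = []
    · subst hc
      by_cases hp : p = [] <;> simp [segRun, gSpec, hp, pvBlocks_nil]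
    · have hpc : p ++ cur ≠ [] := by simp [hc]
      simp only [segRun, if_neg hpc, gSpec, if_neg hc, List.flatMap_cons, List.flatMap_nil,
        List.append_nil]
      rw [pvBlocks_append _ hs p cur hmod,
          pvBlocks_small _ cur hs hc (by omega)]
  | cons l ls ih =>
    intro p cur hmod hcur
    simp only [segRun]
    by_cases hk : pvKw l = true
    · rw [if_pos hk]
      simp only [List.flatMap_cons]
      have h1 : p ++ cur ++ [l] = p ++ (cur ++ [l]) := by simp
      rw [h1, pvBlocks_append _ hs p (cur ++ [l]) hmod,
          pvBlocks_small _ (cur ++ [l]) hs (by simp) (by simp only [List.length_append, List.length_cons, List.length_nil]; omega)]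
      have := ih [] [] (by simp) (by simp only [List.length_nil]; omega)
      simp only [List.append_nil] at this
      rw [this, pvBlocks_nil]
      simp [gSpec, hk]
    · rw [if_neg hk]
      by_cases hEq : cur.length + 1 = (max ml 1).toNat
      · have h1 : p ++ cur ++ [l] = (p ++ (cur ++ [l])) ++ [] := by simp
        rw [h1, ih (p ++ (cur ++ [l])) []
            (by
              simp only [List.length_append, List.length_cons, List.length_nil]
              rw [show p.length + (cur.length + 1) = p.length + (max ml 1).toNat by omega,
                  Nat.add_mod_right]
              exact hmod)
            (by simp only [List.length_nil]; omega)]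
        rw [pvBlocks_append _ hs p (cur ++ [l]) hmod,
            pvBlocks_small _ (cur ++ [l]) hs (by simp) (by simp only [List.length_append, List.length_cons, List.length_nil]; omega)]
        have hEqI : (((cur ++ [l]).length : Int) = max ml 1) := by
          simp only [List.length_append, List.length_cons, List.length_nil]
          omega
        simp only [gSpec, if_pos (Or.inl hEqI)]
        simp
      · have h1 : p ++ cur ++ [l] = p ++ (cur ++ [l]) := by simp
        rw [h1, ih p (cur ++ [l]) hmod (by simp only [List.length_append, List.length_cons, List.length_nil]; omega)]
        have hNe : ¬ (((cur ++ [l]).length : Int) = max ml 1 ∨ pvKw l = true) := by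
          rw [not_or]
          refine ⟨?_, hk⟩
          simp only [List.length_append, List.length_cons, List.length_nil]
          omega
        simp only [gSpec, if_neg hNe]

-- ===== VERDICT (by name: the statement is the Claim_ definition above) =====
theorem smart_chunk_code_spec : Claim_equal_smart_chunk_code := by
  intro lines ml _
  show smart_chunk_code lines ml = smart_chunk_code_alt lines ml
  have hs : (1:Int) ≤ max ml 1 := le_max_right ml 1
  have hA : smart_chunk_code lines ml = gSpec ml [] lines := by
    have h := foldA_eq ml lines [] [] (by simp only [List.length_nil, Nat.cast_zero]; omega)
    simpa using h
  have hB : (if (lines.foldl stepB ([], [])).2 = []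
      then (lines.foldl stepB ([], [])).1
      else (lines.foldl stepB ([], [])).1 ++ [(lines.foldl stepB ([], [])).2])
        = segRun [] lines := by
    simpa using foldB_eq lines [] []
  have hM := segRun_blocks ml lines [] [] (by simp) (by simp only [List.length_nil]; omega)
  simp only [List.nil_append, pvBlocks_nil] at hM
  calc smart_chunk_code lines ml = gSpec ml [] lines := hA
    _ = (segRun [] lines).flatMap (pvBlocks (max ml 1)) := hM.symm
    _ = smart_chunk_code_alt lines ml := by rw [← hB]; rfl
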